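-- pv_equiv track=rewrite | github.com/ArielMoise23/Unlocking-Information-Security-Course | lesson2_basic_cryptography/XORresolver.py | xor_binary_strings
-- ===== SOURCE A (Python) =====
-- def xor_binary_strings(plaintext, keystream):
--     """
--     Performs XOR operation between two binary strings.
--     Preserves spaces in the input strings.
--
--     Args:
--         plaintext (str): Binary string with possible spaces
--         keystream (str): Binary string with possible spaces
--
--     Returns:
--         str: The result of XOR operation, preserving the spacing pattern
--     """
--     # Remove spaces to get clean binary strings
--     clean_plaintext = plaintext.replace(" ", "")
--     clean_keystream = keystream.replace(" ", "")
--
--     # Check if the binary strings have the same length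
--     if len(clean_plaintext) != len(clean_keystream):
--         raise ValueError("Binary strings must have the same length after removing spaces")
--
--     result = []
--     p_index = 0  # Index for the clean plaintext
--
--     # Process each character in the original plaintext string
--     for char in plaintext:
--         if char == " ":
--             # If it's a space, keep it as a space
--             result.append(" ")
--         else:
--             # Get corresponding bits and perform XOR
--             p_bit = int(clean_plaintext[p_index])
--             k_bit = int(clean_keystream[p_index])
--             xor_result = p_bit ^ k_bit  # Python's XOR operator
--             result.append(str(xor_result))
--             p_index += 1
--
--     return "".join(result)
-- ===== SOURCE B (Python) =====
-- def xor_binary_strings(plaintext, keystream):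
--     clean_keystream = keystream.replace(" ", "")
--     # Work word-by-word: split the plaintext on spaces, XOR each word against the
--     # matching slice of the cleaned keystream, then rejoin the words with spaces.
--     words = plaintext.split(" ")
--     if sum(len(w) for w in words) != len(clean_keystream):
--         raise ValueError("Binary strings must have the same length after removing spaces")
--     chunks = []
--     pos = 0
--     for w in words:
--         chunks.append("".join(str(int(p) ^ int(k)) for p, k in zip(w, clean_keystream[pos:pos + len(w)])))
--         pos += len(w)
--     return " ".join(chunks)
-- ===== Notes on version B (the rewrite author's own statement) =====
-- stated objective: alternative
-- what changed: A fuses XOR and space handling into one per-character loop over the plaintext with a running index into the cleaned strings; B instead splits the plaintext into words on spaces, XORs each whole word against the matching slice of the cleaned keystream, and rejoins the chunks with ' '.join. Pre_ excludes exactly the inputs where A raises ValueError (cleaned lengths differ, or a non-digit non-space character).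
import Mathlib
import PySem

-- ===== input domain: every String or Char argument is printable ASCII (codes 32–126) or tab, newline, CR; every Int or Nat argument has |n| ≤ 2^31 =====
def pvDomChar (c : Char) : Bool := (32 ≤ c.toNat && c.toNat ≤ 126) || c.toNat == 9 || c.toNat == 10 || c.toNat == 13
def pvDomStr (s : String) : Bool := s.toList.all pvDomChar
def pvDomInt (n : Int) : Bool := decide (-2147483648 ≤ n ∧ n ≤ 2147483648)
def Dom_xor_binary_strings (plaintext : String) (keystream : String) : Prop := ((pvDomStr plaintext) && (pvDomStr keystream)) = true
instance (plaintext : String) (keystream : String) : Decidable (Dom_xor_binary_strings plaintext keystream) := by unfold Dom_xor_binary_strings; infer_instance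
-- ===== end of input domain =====

-- B replaces A's fused per-character loop (space test + running clean index) by a word-level
-- decomposition: split the plaintext on spaces, XOR each word against the matching slice of the
-- cleaned keystream, and rejoin the chunks with " ".

-- int(c) for a one-character string (Python raises ValueError off digits; Pre_ excludes that, so getD 0 is never taken)
def pvDigit (c : Char) : Int := (PySem.Int.ofChars? [c]).getD 0

-- ===== PORT A =====
def xor_binary_strings (plaintext : String) (keystream : String) : String :=
  let clean_plaintext := PySem.Chars.replace plaintext.toList [' '] []
  let clean_keystream := PySem.Chars.replace keystream.toList [' '] []
  if clean_plaintext.length ≠ clean_keystream.length then ""  -- Python raises ValueError here; excluded by Pre_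
  else
    let r := plaintext.toList.foldl
      (fun (st : List (List Char) × Int) (c : Char) =>
        if c = ' ' then (st.1 ++ [[' ']], st.2)
        else
          let p_bit := pvDigit ((PySem.List.pyGet? clean_plaintext st.2).getD ' ')
          let k_bit := pvDigit ((PySem.List.pyGet? clean_keystream st.2).getD ' ')
          (st.1 ++ [PySem.Int.toChars (PySem.Int.bxor p_bit k_bit)], st.2 + 1))
      ([], 0)
    String.ofList (PySem.Chars.join [] r.1)

-- ===== PORT B =====
def xor_binary_strings_alt (plaintext : String) (keystream : String) : String :=
  let clean_keystream := PySem.Chars.replace keystream.toList [' '] []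
  let words := PySem.Chars.splitOn plaintext.toList [' ']
  if (words.map List.length).sum ≠ clean_keystream.length then ""  -- Python raises ValueError here; excluded by Pre_
  else
    let r := words.foldl
      (fun (st : List (List Char) × Int) (w : List Char) =>
        (st.1 ++ [PySem.Chars.join []
            ((w.zip (PySem.List.slice clean_keystream (some st.2) (some (st.2 + (w.length : Int))))).map
              (fun pk => PySem.Int.toChars (PySem.Int.bxor (pvDigit pk.1) (pvDigit pk.2))))],
         st.2 + (w.length : Int)))
      ([], 0)
    String.ofList (PySem.Chars.join [' '] r.1)

-- ===== PRECONDITION & SPEC =====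
-- Pre_ excludes exactly the inputs where A raises ValueError: cleaned strings of different
-- lengths, or a non-space character that is not a decimal digit (int(c) raises there).
def Pre_xor_binary_strings (plaintext : String) (keystream : String) : Prop :=
  (plaintext.toList.filter (· ≠ ' ')).length = (keystream.toList.filter (· ≠ ' ')).length
  ∧ (plaintext.toList.filter (· ≠ ' ')).all (fun c => PySem.Chars.isdigit c) = true
  ∧ (keystream.toList.filter (· ≠ ' ')).all (fun c => PySem.Chars.isdigit c) = true
instance (plaintext : String) (keystream : String) : Decidable (Pre_xor_binary_strings plaintext keystream) := by
  unfold Pre_xor_binary_strings; infer_instance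

def pvWitness_xor_binary_strings : String × String := ("10 11", "11 01")

def Spec_xor_binary_strings (plaintext : String) (keystream : String) (out : String) : Prop := out = xor_binary_strings_alt plaintext keystream
instance (plaintext : String) (keystream : String) (out : String) : Decidable (Spec_xor_binary_strings plaintext keystream out) := by unfold Spec_xor_binary_strings; infer_instance

-- ===== CLAIM (what is proved, stated in full; the proofs are below) =====
def Claim_equal_xor_binary_strings : Prop := ∀ (plaintext : String) (keystream : String), Dom_xor_binary_strings plaintext keystream → Pre_xor_binary_strings plaintext keystream → Spec_xor_binary_strings plaintext keystream (xor_binary_strings plaintext keystream)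

-- ===== LEMMAS AND PROOFS =====

-- reference model of Python's s.split(" ")
def pvSplit : List Char → List (List Char)
  | [] => [[]]
  | c :: t => if c = ' ' then [] :: pvSplit t else (pvSplit t).modifyHead (c :: ·)

lemma pvSplit_ne_nil (cs : List Char) : pvSplit cs ≠ [] := by
  cases cs with
  | nil => simp [pvSplit]
  | cons c t =>
    simp only [pvSplit]
    split_ifs
    · simp
    · cases h : pvSplit t with
      | nil => exact absurd h (pvSplit_ne_nil t)
      | cons a l => simp

lemma splitOn_go_space (fuel : Nat) (cs cur : List Char) (acc : List (List Char))
    (h : cs.length ≤ fuel) :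
    PySem.Chars.splitOn.go [' '] fuel cs cur acc
      = acc.reverse ++ (pvSplit cs).modifyHead (cur.reverse ++ ·) := by
  induction fuel generalizing cs cur acc with
  | zero =>
    have : cs = [] := List.length_eq_zero_iff.mp (Nat.le_zero.mp h)
    subst this
    rw [PySem.Chars.splitOn.go.eq_def]; simp [pvSplit]
  | succ n ih =>
    cases cs with
    | nil => rw [PySem.Chars.splitOn.go.eq_def]; simp [pvSplit]
    | cons c t =>
      rw [PySem.Chars.splitOn.go.eq_def]
      simp only []
      by_cases hc : c = ' '
      · subst hc
        rw [if_pos (by simp [List.isPrefixOf])]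
        simp only [List.length_cons, List.length_nil, List.drop_succ_cons, List.drop_zero]
        rw [ih t [] (List.reverse cur :: acc) (by simpa using h)]
        obtain ⟨a, l, hal⟩ : ∃ a l, pvSplit t = a :: l := by
          cases h' : pvSplit t with
          | nil => exact absurd h' (pvSplit_ne_nil t)
          | cons a l => exact ⟨a, l, rfl⟩
        simp [pvSplit, hal]
      · rw [if_neg (by simp [List.isPrefixOf, Ne.symm hc])]
        rw [ih t (c :: cur) acc (by simpa using h)]
        simp only [pvSplit, if_neg hc]
        obtain ⟨a, l, hal⟩ : ∃ a l, pvSplit t = a :: l := by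
          cases h' : pvSplit t with
          | nil => exact absurd h' (pvSplit_ne_nil t)
          | cons a l => exact ⟨a, l, rfl⟩
        simp [hal]

lemma splitOn_space_eq (cs : List Char) :
    PySem.Chars.splitOn cs [' '] = pvSplit cs := by
  show PySem.Chars.splitOn.go [' '] (cs.length + 1) cs [] [] = _
  rw [splitOn_go_space _ _ _ _ (by omega)]
  simp only [List.reverse_nil, List.nil_append]
  exact congrFun List.modifyHead_id _

lemma pvSplit_no_space (cs : List Char) : ∀ w ∈ pvSplit cs, ' ' ∉ w := by
  induction cs with
  | nil => simp [pvSplit]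
  | cons c t ih =>
    simp only [pvSplit]
    split_ifs with hc
    · intro w hw
      rcases List.mem_cons.mp hw with hw | hw
      · simp [hw]
      · exact ih w hw
    · obtain ⟨a, l, hal⟩ : ∃ a l, pvSplit t = a :: l := by
        cases h' : pvSplit t with
        | nil => exact absurd h' (pvSplit_ne_nil t)
        | cons a l => exact ⟨a, l, rfl⟩
      rw [hal]
      intro w hw
      rcases List.mem_cons.mp hw with hw | hw
      · subst hw
        intro hsp
        rcases List.mem_cons.mp hsp with h | h
        · exact hc h.symm
        · exact ih a (by rw [hal]; simp) h
      · exact ih w (by rw [hal]; exact List.mem_cons_of_mem _ hw)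

lemma pvSplit_flatten (cs : List Char) :
    (pvSplit cs).flatten = cs.filter (· ≠ ' ') := by
  induction cs with
  | nil => simp [pvSplit]
  | cons c t ih =>
    simp only [pvSplit]
    split_ifs with hc
    · subst hc; simp [ih]
    · obtain ⟨a, l, hal⟩ : ∃ a l, pvSplit t = a :: l := by
        cases h' : pvSplit t with
        | nil => exact absurd h' (pvSplit_ne_nil t)
        | cons a l => exact ⟨a, l, rfl⟩
      rw [hal]
      simp only [List.modifyHead, List.flatten_cons]
      rw [hal] at ih
      simp only [List.flatten_cons] at ih
      simp [hc, ih]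

lemma intercalate2 {α : Type} (sep a b : List α) (l : List (List α)) :
    sep.intercalate (a :: b :: l) = a ++ sep ++ sep.intercalate (b :: l) := by
  simp [List.intercalate, List.intersperse_cons₂]

lemma pvSplit_intercalate (cs : List Char) :
    [' '].intercalate (pvSplit cs) = cs := by
  induction cs with
  | nil => simp [pvSplit, List.intercalate]
  | cons c t ih =>
    obtain ⟨a, l, hal⟩ : ∃ a l, pvSplit t = a :: l := by
      cases h' : pvSplit t with
      | nil => exact absurd h' (pvSplit_ne_nil t)
      | cons a l => exact ⟨a, l, rfl⟩
    simp only [pvSplit]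
    split_ifs with hc
    · subst hc
      rw [hal] at ih ⊢
      rw [intercalate2]
      simp [ih]
    · rw [hal] at ih ⊢
      simp only [List.modifyHead]
      cases l with
      | nil => simp_all [List.intercalate]
      | cons b l' =>
        rw [intercalate2] at ih ⊢
        simp_all

-- the per-word XOR chunk, as A produces it (one singleton/short piece per character)
def pvChunk (ck w : List Char) (n : Nat) : List (List Char) :=
  (w.zip ((ck.drop n).take w.length)).map
    (fun pk => PySem.Int.toChars (PySem.Int.bxor (pvDigit pk.1) (pvDigit pk.2)))

-- A's pieces for a list of words starting at clean index n
def pvPieces (ck : List Char) : List (List Char) → Nat → List (List Char)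
  | [], _ => []
  | [w], n => pvChunk ck w n
  | w :: w' :: ws, n => pvChunk ck w n ++ [' '] :: pvPieces ck (w' :: ws) (n + w.length)

-- B's chunk strings for a list of words starting at clean index n
def pvChunks (ck : List Char) : List (List Char) → Nat → List (List Char)
  | [], _ => []
  | w :: ws, n => (pvChunk ck w n).flatten :: pvChunks ck ws (n + w.length)

lemma intercalate_nil_sep {α : Type} (l : List (List α)) :
    ([] : List α).intercalate l = l.flatten := by
  induction l with
  | nil => simp [List.intercalate]
  | cons a l ih =>
    cases l with
    | nil => simp [List.intercalate]
    | cons b t =>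
      rw [intercalate2, ih]
      simp

lemma flatten_pieces (ck : List Char) (ws : List (List Char)) (n : Nat) (h : ws ≠ []) :
    (pvPieces ck ws n).flatten = [' '].intercalate (pvChunks ck ws n) := by
  induction ws generalizing n with
  | nil => simp at h
  | cons w ws ih =>
    cases ws with
    | nil => simp [pvPieces, pvChunks, List.intercalate]
    | cons w' ws' =>
      simp only [pvPieces, List.flatten_append, List.flatten_cons]
      rw [ih (n + w.length) (by simp)]
      simp only [pvChunks, intercalate2]
      simp

-- A's fused loop over one space-free word
lemma foldA_word (cp ck w pre rest : List Char) (hw : ' ' ∉ w)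
    (hcp : cp = pre ++ w ++ rest) (hck : pre.length + w.length ≤ ck.length) :
    ∀ acc : List (List Char),
    (w.foldl
      (fun (st : List (List Char) × Int) (c : Char) =>
        if c = ' ' then (st.1 ++ [[' ']], st.2)
        else
          (st.1 ++ [PySem.Int.toChars (PySem.Int.bxor
              (pvDigit ((PySem.List.pyGet? cp st.2).getD ' '))
              (pvDigit ((PySem.List.pyGet? ck st.2).getD ' ')))], st.2 + 1))
      (acc, (pre.length : Int)))
    = (acc ++ pvChunk ck w pre.length, ((pre.length + w.length : Nat) : Int)) := by
  induction w generalizing pre with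
  | nil => intro acc; simp [pvChunk]
  | cons x w' ih =>
    intro acc
    have hx : x ≠ ' ' := fun h => hw (h ▸ List.mem_cons_self)
    have hnp : pre.length < cp.length := by subst hcp; simp only [List.length_append, List.length_cons]; omega
    have hnk : pre.length < ck.length := by simp only [List.length_cons] at hck; omega
    simp only [List.foldl_cons, if_neg hx]
    rw [PySem.List.pyGet?_natCast, PySem.List.pyGet?_natCast]
    have hcpn : cp[pre.length]? = some x := by
      subst hcp
      rw [List.getElem?_append_left (by simp)]
      rw [List.getElem?_append_right (le_refl _)]
      simp
    have hckn : ck[pre.length]? = some ck[pre.length] := List.getElem?_eq_getElem hnk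
    rw [hcpn, hckn]
    simp only [Option.getD_some]
    have hcast : ((pre.length : Int) + 1) = (((pre ++ [x]).length : Nat) : Int) := by
      simp
    rw [hcast, ih (pre ++ [x]) (fun h => hw (List.mem_cons_of_mem _ h))
      (by simpa using hcp)
      (by simp only [List.length_append, List.length_cons, List.length_nil] at hck ⊢; omega) _]
    have hdrop : ck.drop pre.length = ck[pre.length] :: ck.drop (pre.length + 1) :=
      (List.getElem_cons_drop hnk).symm
    simp only [pvChunk, List.length_append, List.length_cons, List.length_nil, hdrop,
      List.take_succ_cons, List.zip_cons_cons, List.map_cons, Prod.mk.injEq]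
    refine ⟨by simp, by push_cast; ring⟩

-- A's fused loop over an intercalated word list
lemma foldA_words (cp ck : List Char) (ws : List (List Char)) :
    ∀ (pre : List Char) (acc : List (List Char)),
    ws ≠ [] → (∀ w ∈ ws, ' ' ∉ w) →
    cp = pre ++ ws.flatten → pre.length + ws.flatten.length ≤ ck.length →
    (([' '].intercalate ws).foldl
      (fun (st : List (List Char) × Int) (c : Char) =>
        if c = ' ' then (st.1 ++ [[' ']], st.2)
        else
          (st.1 ++ [PySem.Int.toChars (PySem.Int.bxor
              (pvDigit ((PySem.List.pyGet? cp st.2).getD ' '))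
              (pvDigit ((PySem.List.pyGet? ck st.2).getD ' ')))], st.2 + 1))
      (acc, (pre.length : Int))).1
    = acc ++ pvPieces ck ws pre.length := by
  induction ws with
  | nil => intro _ _ h; simp at h
  | cons w ws ih =>
    intro pre acc _ hnosp hcp hck
    cases ws with
    | nil =>
      simp only [List.flatten_cons, List.flatten_nil, List.append_nil] at hcp hck
      have h1 : [' '].intercalate [w] = w := by simp [List.intercalate]
      rw [h1]
      rw [foldA_word cp ck w pre [] (hnosp w List.mem_cons_self)
        (by simpa using hcp) hck acc]
      simp [pvPieces]
    | cons w' ws' =>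
      rw [intercalate2]
      simp only [List.foldl_append, List.append_assoc, List.singleton_append, List.foldl_cons]
      rw [foldA_word cp ck w pre ((w' :: ws').flatten)
        (hnosp w List.mem_cons_self)
        (by simpa using hcp) (by simp at hck ⊢; omega) acc]
      simp only [reduceIte]
      have hcast : ((pre.length + w.length : Nat) : Int)
          = (((pre ++ w).length : Nat) : Int) := by simp
      rw [hcast, ih (pre ++ w) (acc ++ pvChunk ck w pre.length ++ [[' ']])
        (by simp) (fun u hu => hnosp u (List.mem_cons_of_mem _ hu))
        (by simpa using hcp) (by simp at hck ⊢; omega)]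
      simp [pvPieces]

-- B's word loop
lemma foldB_words (ck : List Char) (ws : List (List Char)) :
    ∀ (n : Nat) (acc : List (List Char)),
    (ws.foldl
      (fun (st : List (List Char) × Int) (w : List Char) =>
        (st.1 ++ [PySem.Chars.join []
            ((w.zip (PySem.List.slice ck (some st.2) (some (st.2 + (w.length : Int))))).map
              (fun pk => PySem.Int.toChars (PySem.Int.bxor (pvDigit pk.1) (pvDigit pk.2))))],
         st.2 + (w.length : Int)))
      (acc, (n : Int))).1
    = acc ++ pvChunks ck ws n := by
  induction ws with
  | nil => intro n acc; simp [pvChunks]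
  | cons w ws ih =>
    intro n acc
    simp only [List.foldl_cons]
    have hsl : PySem.List.slice ck (some (n : Int)) (some ((n : Int) + (w.length : Int)))
        = (ck.drop n).take w.length := PySem.List.slice_natCast_add ck n w.length
    have hcast : ((n : Int) + (w.length : Int)) = ((n + w.length : Nat) : Int) := by push_cast; ring
    rw [hsl, hcast, ih (n + w.length)]
    have : PySem.Chars.join []
        ((w.zip ((ck.drop n).take w.length)).map
          (fun pk => PySem.Int.toChars (PySem.Int.bxor (pvDigit pk.1) (pvDigit pk.2))))
        = (pvChunk ck w n).flatten := by
      rw [PySem.Chars.join, intercalate_nil_sep, pvChunk]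
    rw [this]
    simp [pvChunks]

-- removing all spaces is filtering them out
lemma replace_space_go (fuel : Nat) (cs acc : List Char) (h : cs.length ≤ fuel) :
    PySem.Chars.replace.go [' '] [] fuel cs acc = acc.reverse ++ cs.filter (· ≠ ' ') := by
  induction fuel generalizing cs acc with
  | zero =>
    have : cs = [] := List.length_eq_zero_iff.mp (Nat.le_zero.mp h)
    subst this; rw [PySem.Chars.replace.go.eq_def]; simp
  | succ n ih =>
    cases cs with
    | nil => rw [PySem.Chars.replace.go.eq_def]; simp
    | cons c t =>
      rw [PySem.Chars.replace.go.eq_def]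
      simp only []
      by_cases hc : c = ' '
      · subst hc
        rw [if_pos (by simp [List.isPrefixOf])]
        simpa using ih t acc (by simpa using h)
      · rw [if_neg (by simp [List.isPrefixOf, Ne.symm hc])]
        rw [ih t (c :: acc) (by simpa using h)]
        simp [hc]

lemma replace_space_eq_filter (cs : List Char) :
    PySem.Chars.replace cs [' '] [] = cs.filter (· ≠ ' ') := by
  simp only [PySem.Chars.replace, List.isEmpty_cons]
  simpa using replace_space_go cs.length cs [] le_rfl

-- ===== VERDICT (by name: the statement is the Claim_ definition above) =====
theorem xor_binary_strings_spec : Claim_equal_xor_binary_strings := by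
  intro plaintext keystream _ hpre
  obtain ⟨hlen, -, -⟩ := hpre
  simp only [Spec_xor_binary_strings, xor_binary_strings, xor_binary_strings_alt,
    splitOn_space_eq, replace_space_eq_filter]
  have hsum : ((pvSplit plaintext.toList).map List.length).sum
      = (plaintext.toList.filter (· ≠ ' ')).length := by
    rw [← pvSplit_flatten]; simp [List.length_flatten]
  rw [hsum]
  simp only [if_neg (not_ne_iff.mpr hlen)]
  have hck := hlen.symm
  have h0 : (0 : Int) = ((0 : Nat) : Int) := rfl
  have hA := foldA_words (plaintext.toList.filter (· ≠ ' ')) (keystream.toList.filter (· ≠ ' '))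
    (pvSplit plaintext.toList) [] [] (pvSplit_ne_nil _) (pvSplit_no_space _)
    (by rw [pvSplit_flatten, List.nil_append])
    (by rw [pvSplit_flatten]; simp only [List.length_nil]; omega)
  have hB := foldB_words (keystream.toList.filter (· ≠ ' ')) (pvSplit plaintext.toList) 0 []
  simp only [List.length_nil] at hA
  rw [pvSplit_intercalate] at hA
  rw [h0, hA, hB]
  simp only [List.nil_append]
  rw [PySem.Chars.join, PySem.Chars.join, intercalate_nil_sep,
    flatten_pieces _ _ _ (pvSplit_ne_nil _)]
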